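-- pv_equiv track=rewrite | github.com/takaria0/initbinder | archive/scripts/posthoc_check.py | _seq_pad_set
-- ===== SOURCE A (Python) =====
-- from typing import Dict, Iterable, List, Set, Tuple
--
-- def _seq_pad_set(res_list: List, base_set: Set, pad: int) -> Set:
--     if pad <= 0 or not base_set:
--         return set(base_set)
--     idx_map = {res: i for i, res in enumerate(res_list)}
--     expanded = set(base_set)
--     for r in list(base_set):
--         if r not in idx_map:
--             continue
--         i = idx_map[r]
--         lo = max(0, i - pad); hi = min(len(res_list), i + pad + 1)
--         expanded.update(res_list[lo:hi])
--     return expanded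
-- ===== SOURCE B (Python) =====
-- def _skip(nxt, j):
--     # follow successor pointers: jump past stretches of indices already expanded
--     while j in nxt:
--         j = nxt[j]
--     return j
--
--
-- def _seq_pad_set(res_list, base_set, pad):
--     if pad <= 0 or not base_set:
--         return set(base_set)
--     idx_map = {res: i for i, res in enumerate(res_list)}
--     n = len(res_list)
--     expanded = set(base_set)
--     nxt = {}  # nxt[j] = end of a stretch of indices whose residues were already added
--     for r in base_set:
--         if r not in idx_map:
--             continue
--         i = idx_map[r]
--         hi = min(n, i + pad + 1)
--         j = _skip(nxt, max(0, i - pad))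
--         while j < hi:
--             expanded.add(res_list[j])
--             nxt[j] = hi
--             j = _skip(nxt, j + 1)
--     return expanded
-- ===== Notes on version B (the rewrite author's own statement) =====
-- stated objective: faster
-- what changed: Instead of re-adding the full +-pad slice for every base residue, B keeps successor pointers over already-expanded index stretches and jumps past them, so each res_list index is added at most once.
import Mathlib
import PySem

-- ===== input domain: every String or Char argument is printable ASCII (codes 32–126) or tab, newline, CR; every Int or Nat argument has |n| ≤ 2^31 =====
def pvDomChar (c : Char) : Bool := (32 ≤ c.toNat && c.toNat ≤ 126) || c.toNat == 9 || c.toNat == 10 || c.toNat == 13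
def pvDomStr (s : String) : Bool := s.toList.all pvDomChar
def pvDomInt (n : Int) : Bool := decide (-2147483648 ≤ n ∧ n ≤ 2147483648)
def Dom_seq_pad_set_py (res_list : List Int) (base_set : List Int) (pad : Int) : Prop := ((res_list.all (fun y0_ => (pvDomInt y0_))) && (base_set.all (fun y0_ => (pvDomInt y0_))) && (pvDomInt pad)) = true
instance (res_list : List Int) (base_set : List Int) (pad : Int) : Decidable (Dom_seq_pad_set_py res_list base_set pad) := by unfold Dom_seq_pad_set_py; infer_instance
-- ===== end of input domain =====

-- B replaces A's per-element re-scan of the whole ±pad window by successor-pointer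
-- jumps over already-added index stretches, so each residue index is added once (objective: faster).

-- ===== PORT A =====
-- one iteration of A's 'for r in list(base_set):' loop body
def pvStepA (res : List Int) (pad : Int) (idx : PySem.Dict Int Int) (e : List Int) (r : Int) : List Int :=
  match PySem.Dict.get? idx r with
  | none => e                                   -- 'if r not in idx_map: continue'
  | some i =>
    let lo := max 0 (i - pad)
    let hi := min (PySem.List.len res) (i + pad + 1)
    PySem.Set.update e (PySem.List.slice res (some lo) (some hi))   -- expanded.update(res_list[lo:hi])

def seq_pad_set_py (res_list : List Int) (base_set : List Int) (pad : Int) : List Int :=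
  if pad ≤ 0 ∨ base_set = [] then PySem.Set.ofList base_set
  else
    let idx_map : PySem.Dict Int Int :=
      (PySem.List.enumerate res_list).foldl (fun d p => d.insert p.2 p.1) PySem.Dict.empty
    (PySem.Set.ofList base_set).foldl (pvStepA res_list pad idx_map) (PySem.Set.ofList base_set)

-- ===== PORT B =====
-- _skip: follow successor pointers (fuel only makes the Python 'while' structurally total;
-- it is never exhausted in runs reachable from seq_pad_set_py_alt)
def pvSkip (nxt : PySem.Dict Int Int) (j : Int) : Nat → Int
  | 0 => j
  | fuel+1 =>
    match PySem.Dict.get? nxt j with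
    | none => j
    | some k => pvSkip nxt k fuel

-- the 'while j < hi:' loop of B (fuel (hi-j)+1 is an upper bound on its iterations)
def pvWindow (res : List Int) (hi : Int) : Nat → List Int → PySem.Dict Int Int → Int → List Int × PySem.Dict Int Int
  | 0, e, nxt, _ => (e, nxt)
  | fuel+1, e, nxt, j =>
    if j < hi then
      let e' := PySem.Set.add e (PySem.List.pyGetD res j 0)   -- res_list[j]; j is in range whenever this loop runs
      let nxt' := PySem.Dict.insert nxt j hi
      pvWindow res hi fuel e' nxt' (pvSkip nxt' (j + 1) ((PySem.Dict.items nxt').length + 1))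
    else (e, nxt)

-- one iteration of B's 'for r in base_set:' loop body
def pvStepB (res : List Int) (pad : Int) (idx : PySem.Dict Int Int)
    (st : List Int × PySem.Dict Int Int) (r : Int) : List Int × PySem.Dict Int Int :=
  match PySem.Dict.get? idx r with
  | none => st
  | some i =>
    let hi := min (PySem.List.len res) (i + pad + 1)
    let j := pvSkip st.2 (max 0 (i - pad)) ((PySem.Dict.items st.2).length + 1)
    pvWindow res hi ((hi - j).toNat + 1) st.1 st.2 j

def seq_pad_set_py_alt (res_list : List Int) (base_set : List Int) (pad : Int) : List Int :=
  if pad ≤ 0 ∨ base_set = [] then PySem.Set.ofList base_set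
  else
    let idx_map : PySem.Dict Int Int :=
      (PySem.List.enumerate res_list).foldl (fun d p => d.insert p.2 p.1) PySem.Dict.empty
    ((PySem.Set.ofList base_set).foldl (pvStepB res_list pad idx_map)
      (PySem.Set.ofList base_set, PySem.Dict.empty)).1

-- ===== PRECONDITION & SPEC =====
def Spec_seq_pad_set_py (res_list : List Int) (base_set : List Int) (pad : Int) (out : List Int) : Prop := out = seq_pad_set_py_alt res_list base_set pad
instance (res_list : List Int) (base_set : List Int) (pad : Int) (out : List Int) : Decidable (Spec_seq_pad_set_py res_list base_set pad out) := by unfold Spec_seq_pad_set_py; infer_instance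

-- ===== CLAIM (what is proved, stated in full; the proofs are below) =====
def Claim_equal_seq_pad_set_py : Prop := ∀ (res_list : List Int) (base_set : List Int) (pad : Int), Dom_seq_pad_set_py res_list base_set pad → Spec_seq_pad_set_py res_list base_set pad (seq_pad_set_py res_list base_set pad)

-- ===== LEMMAS AND PROOFS =====

-- m is an index whose residue was already added
def pvCov (nxt : PySem.Dict Int Int) (m : Int) : Prop := (PySem.Dict.get? nxt m).isSome

-- every index in [a, b) is covered
def pvFull (nxt : PySem.Dict Int Int) (a b : Int) : Prop :=
  ∀ m, a ≤ m → m < b → pvCov nxt m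

-- facts true of every pointer entry (a, b)
def pvBasic (res e : List Int) (a b : Int) : Prop :=
  a < b ∧ 0 ≤ a ∧ a < (res.length : Int) ∧ PySem.List.pyGetD res a 0 ∈ e

-- invariant between windows: every entry's whole stretch is covered
def pvInv (res e : List Int) (nxt : PySem.Dict Int Int) : Prop :=
  (PySem.Dict.keys nxt).Nodup ∧
  ∀ a b, PySem.Dict.get? nxt a = some b → pvBasic res e a b ∧ pvFull nxt a b

-- invariant inside a window, at position j: entries written this window end at hi and are covered up to j
def pvInvW (res e : List Int) (nxt : PySem.Dict Int Int) (j hi : Int) : Prop :=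
  (PySem.Dict.keys nxt).Nodup ∧
  ∀ a b, PySem.Dict.get? nxt a = some b →
    pvBasic res e a b ∧ (pvFull nxt a b ∨ (b = hi ∧ a < j ∧ pvFull nxt a j))

lemma pv_countP_lt_of_mem {l : List (Int × Int)} {p k b : Int}
    (hmem : (p, b) ∈ l) (hnd : (l.map Prod.fst).Nodup) (hpk : p < k) :
    l.countP (fun pr => decide (k ≤ pr.1)) + 1 ≤ l.countP (fun pr => decide (p ≤ pr.1)) := by
  induction l with
  | nil => simp at hmem
  | cons hd t ih =>
    simp only [List.map_cons, List.nodup_cons] at hnd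
    rcases List.mem_cons.mp hmem with heq | hmem'
    · subst heq
      simp only [List.countP_cons]
      have hmono : t.countP (fun pr => decide (k ≤ pr.1)) ≤ t.countP (fun pr => decide (p ≤ pr.1)) := by
        apply List.countP_mono_left
        intro a _ ha
        simp only [decide_eq_true_eq] at *
        omega
      simp only [decide_eq_true_eq]
      rw [if_neg (by omega), if_pos (by omega)]
      omega
    · have := ih hmem' hnd.2
      simp only [List.countP_cons, decide_eq_true_eq]
      by_cases h1 : k ≤ hd.1
      · rw [if_pos h1, if_pos (by omega)]; omega
      · rw [if_neg h1]; split <;> omega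

lemma pv_skip_spec (nxt : PySem.Dict Int Int)
    (hmono : ∀ a b, PySem.Dict.get? nxt a = some b → a < b)
    (hnd : (PySem.Dict.keys nxt).Nodup) :
    ∀ fuel p, (PySem.Dict.items nxt).countP (fun pr => decide (p ≤ pr.1)) < fuel →
    (∀ a b, PySem.Dict.get? nxt a = some b → p ≤ a → pvFull nxt a b) →
    p ≤ pvSkip nxt p fuel ∧ ¬ pvCov nxt (pvSkip nxt p fuel) ∧
      ∀ m, p ≤ m → m < pvSkip nxt p fuel → pvCov nxt m := by
  intro fuel
  induction fuel with
  | zero => intro p hcount _; omega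
  | succ fuel ih =>
    intro p hcount hfull
    cases hg : PySem.Dict.get? nxt p with
    | none =>
      simp only [pvSkip, hg]
      refine ⟨le_rfl, ?_, ?_⟩
      · simp [pvCov, hg]
      · intro m h1 h2; omega
    | some k =>
      simp only [pvSkip, hg]
      have hk : p < k := hmono _ _ hg
      have hndi : ((PySem.Dict.items nxt).map Prod.fst).Nodup := by
        simpa [PySem.Dict.keys] using hnd
      have hcnt : (PySem.Dict.items nxt).countP (fun pr => decide (k ≤ pr.1)) < fuel := by
        have := pv_countP_lt_of_mem (PySem.Dict.mem_items_of_get?_eq_some nxt hg) hndi hk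
        omega
      have hrec := ih k hcnt (fun a b hab ha => hfull a b hab (by omega))
      refine ⟨by omega, hrec.2.1, ?_⟩
      intro m h1 h2
      by_cases hmk : m < k
      · exact hfull p k hg le_rfl m h1 hmk
      · exact hrec.2.2 m (by omega) h2

lemma pv_slice_cons (res : List Int) (p hi : Int) (h0 : 0 ≤ p) (hp : p < hi)
    (hhi : hi ≤ (res.length : Int)) :
    PySem.List.slice res (some p) (some hi)
      = PySem.List.pyGetD res p 0 :: PySem.List.slice res (some (p + 1)) (some hi) := by
  rw [PySem.List.slice_toNat _ h0 (by omega), PySem.List.slice_toNat _ (by omega : (0:Int) ≤ p+1) (by omega)]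
  have hplen : p.toNat < res.length := by omega
  rw [PySem.List.pyGetD_eq_getElem res 0 h0 (by omega)]
  rw [List.drop_eq_getElem_cons hplen]
  have h1 : (p+1).toNat = p.toNat + 1 := by omega
  have h2 : hi.toNat - p.toNat = (hi.toNat - (p.toNat + 1)) + 1 := by omega
  rw [h1, h2, List.take_succ_cons]

lemma pv_slice_nil (res : List Int) (p hi : Int) (h0 : 0 ≤ p) (h1 : 0 ≤ hi) (h : hi ≤ p) :
    PySem.List.slice res (some p) (some hi) = [] := by
  rw [PySem.List.slice_toNat _ h0 h1]
  have : hi.toNat - p.toNat = 0 := by omega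
  simp [this]

lemma pv_fold_slice_drop (res : List Int) (hi : Int) (h1 : 0 ≤ hi) (hhi : hi ≤ (res.length : Int)) :
    ∀ (d : Nat) (p q : Int) (e : List Int), 0 ≤ p → p ≤ q → (q - p).toNat ≤ d →
    (∀ m, p ≤ m → m < q → PySem.List.pyGetD res m 0 ∈ e) →
    (PySem.List.slice res (some p) (some hi)).foldl PySem.Set.add e
      = (PySem.List.slice res (some q) (some hi)).foldl PySem.Set.add e := by
  intro d
  induction d with
  | zero =>
    intro p q e hp hpq hd _
    have h : p = q := by omega
    rw [h]
  | succ d ih =>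
    intro p q e hp hpq hd hmem
    by_cases hpq' : p = q
    · rw [hpq']
    · by_cases hph : p < hi
      · rw [pv_slice_cons res p hi hp hph hhi]
        have hmemp : PySem.List.pyGetD res p 0 ∈ e := hmem p le_rfl (by omega)
        simp only [List.foldl_cons, PySem.Set.add_of_mem hmemp]
        exact ih (p+1) q e (by omega) (by omega) (by omega) (fun m h1 h2 => hmem m (by omega) h2)
      · rw [pv_slice_nil res p hi hp h1 (by omega), pv_slice_nil res q hi (by omega) h1 (by omega)]

lemma pv_window_eq (res : List Int) (hi : Int) (hhi0 : 0 ≤ hi) (hhin : hi ≤ (res.length : Int)) :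
    ∀ fuel (e : List Int) (nxt : PySem.Dict Int Int) (j : Int),
    (hi - j).toNat < fuel → 0 ≤ j → ¬ pvCov nxt j → pvInvW res e nxt j hi →
    (pvWindow res hi fuel e nxt j).1
        = (PySem.List.slice res (some j) (some hi)).foldl PySem.Set.add e
      ∧ pvInv res (pvWindow res hi fuel e nxt j).1 (pvWindow res hi fuel e nxt j).2
      ∧ ∀ m, pvCov (pvWindow res hi fuel e nxt j).2 m ↔ pvCov nxt m ∨ (j ≤ m ∧ m < hi) := by
  intro fuel
  induction fuel with
  | zero => intro e nxt j hfuel; omega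
  | succ fuel ih =>
    intro e nxt j hfuel hj hcov hinv
    by_cases hjh : j < hi
    · -- loop body runs
      set g := PySem.List.pyGetD res j 0 with hg
      set e' := PySem.Set.add e g with he'
      set nxt' := PySem.Dict.insert nxt j hi with hnxt'
      have hget' : ∀ x, PySem.Dict.get? nxt' x = if x = j then some hi else PySem.Dict.get? nxt x := by
        intro x; rw [hnxt']; exact PySem.Dict.get?_insert nxt j x hi
      have hcovmono : ∀ m, pvCov nxt m → pvCov nxt' m := by
        intro m hm
        simp only [pvCov, hget']
        split
        · simp
        · exact hm
      have hcovj : pvCov nxt' j := by simp [pvCov, hget']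
      have hcov'_iff : ∀ m, pvCov nxt' m ↔ pvCov nxt m ∨ m = j := by
        intro m
        simp only [pvCov, hget']
        by_cases hmj : m = j <;> simp [hmj]
      have hmono' : ∀ a b, PySem.Dict.get? nxt' a = some b → a < b := by
        intro a b hab
        rw [hget'] at hab
        split at hab
        · cases hab; omega
        · exact (hinv.2 a b hab).1.1
      have hnd' : (PySem.Dict.keys nxt').Nodup := PySem.Dict.nodup_keys_insert nxt j hi hinv.1
      have hfull' : ∀ a b, PySem.Dict.get? nxt' a = some b → j + 1 ≤ a → pvFull nxt' a b := by
        intro a b hab ha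
        rw [hget'] at hab
        split at hab
        · omega
        · rcases (hinv.2 a b hab).2 with hF | ⟨_, haj, _⟩
          · intro m h1 h2; exact hcovmono m (hF m h1 h2)
          · omega
      have hskip := pv_skip_spec nxt' hmono' hnd' ((PySem.Dict.items nxt').length + 1) (j + 1)
        (Nat.lt_succ_of_le List.countP_le_length) hfull'
      set j₂ := pvSkip nxt' (j + 1) ((PySem.Dict.items nxt').length + 1) with hj₂
      obtain ⟨hj₂ge, hj₂nc, hj₂cov⟩ := hskip
      -- membership of covered residues in e'
      have hmem' : ∀ m, pvCov nxt' m → PySem.List.pyGetD res m 0 ∈ e' := by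
        intro m hm
        rcases Option.isSome_iff_exists.mp hm with ⟨bm, hbm⟩
        rw [hget'] at hbm
        split at hbm
        · rename_i hmj
          subst hmj
          rw [he', hg]
          exact (PySem.Set.mem_add ..).mpr (Or.inr rfl)
        · exact (PySem.Set.mem_add ..).mpr (Or.inl (hinv.2 m bm hbm).1.2.2.2)
      have hinvW₂ : pvInvW res e' nxt' j₂ hi := by
        refine ⟨hnd', ?_⟩
        intro a b hab
        have hab' := hab
        rw [hget'] at hab'
        split at hab'
        · -- the new entry (j, hi)
          rename_i haj
          subst haj
          cases hab'
          refine ⟨⟨hjh, hj, by omega, hmem' a hcovj⟩, Or.inr ⟨rfl, by omega, ?_⟩⟩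
          intro m h1 h2
          by_cases hmj : m = a
          · subst hmj; exact hcovj
          · exact hj₂cov m (by omega) h2
        · -- an old entry
          have hold := hinv.2 a b hab'
          refine ⟨⟨hold.1.1, hold.1.2.1, hold.1.2.2.1, ?_⟩, ?_⟩
          · rw [he']; exact (PySem.Set.mem_add ..).mpr (Or.inl hold.1.2.2.2)
          · rcases hold.2 with hF | ⟨hbh, haj, hFj⟩
            · exact Or.inl (fun m h1 h2 => hcovmono m (hF m h1 h2))
            · refine Or.inr ⟨hbh, by omega, ?_⟩
              intro m h1 h2
              by_cases hmj : m < j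
              · exact hcovmono m (hFj m h1 hmj)
              · by_cases hmj' : m = j
                · subst hmj'; exact hcovj
                · exact hj₂cov m (by omega) h2
      have hfuel₂ : (hi - j₂).toNat < fuel := by omega
      have hrec := ih e' nxt' j₂ hfuel₂ (by omega) hj₂nc hinvW₂
      have hred : pvWindow res hi (fuel + 1) e nxt j = pvWindow res hi fuel e' nxt' j₂ := by
        simp only [pvWindow, if_pos hjh]
        rfl
      rw [hred]
      refine ⟨?_, hrec.2.1, ?_⟩
      · rw [hrec.1]
        rw [pv_slice_cons res j hi hj hjh hhin]
        simp only [List.foldl_cons]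
        exact (pv_fold_slice_drop res hi hhi0 hhin (j₂ - (j+1)).toNat (j+1) j₂ e'
          (by omega) hj₂ge le_rfl
          (fun m h1 h2 => hmem' m (hj₂cov m h1 h2))).symm
      · intro m
        rw [hrec.2.2 m]
        constructor
        · rintro (hc | ⟨h1, h2⟩)
          · rcases (hcov'_iff m).mp hc with h | h
            · exact Or.inl h
            · exact Or.inr ⟨by omega, by omega⟩
          · exact Or.inr ⟨by omega, h2⟩
        · rintro (hc | ⟨h1, h2⟩)
          · exact Or.inl (hcovmono m hc)
          · by_cases hm2 : m < j₂
            · by_cases hmj : m = j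
              · exact Or.inl (by subst hmj; exact hcovj)
              · exact Or.inl (hj₂cov m (by omega) hm2)
            · exact Or.inr ⟨by omega, h2⟩
    · -- loop does not run
      have hred : pvWindow res hi (fuel + 1) e nxt j = (e, nxt) := by
        simp only [pvWindow, if_neg hjh]
      rw [hred]
      refine ⟨?_, ⟨hinv.1, ?_⟩, ?_⟩
      · rw [pv_slice_nil res j hi hj hhi0 (by omega)]
        rfl
      · intro a b hab
        have h := hinv.2 a b hab
        refine ⟨h.1, ?_⟩
        rcases h.2 with hF | ⟨hbh, haj, hFj⟩
        · exact hF
        · intro m h1 h2; exact hFj m h1 (by omega)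
      · intro m
        constructor
        · exact fun h => Or.inl h
        · rintro (h | ⟨h1, h2⟩)
          · exact h
          · omega

lemma pv_foldl_insert_val {l : List (Int × Int)} :
    ∀ (d : PySem.Dict Int Int) (r i : Int),
    (r, i) ∈ (l.foldl (fun (d : PySem.Dict Int Int) p => d.insert p.2 p.1) d).items →
    (r, i) ∈ d.items ∨ ∃ q ∈ l, q.1 = i := by
  induction l with
  | nil => intro d r i h; exact Or.inl h
  | cons q t ih =>
    intro d r i h
    rcases ih _ r i h with h' | ⟨w, hw, hwe⟩
    · rcases (PySem.Dict.mem_items_insert d q.2 q.1 (r, i)).mp h' with he | ⟨hd, _⟩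
      · right; exact ⟨q, List.mem_cons_self .., by simpa using (congrArg Prod.snd he).symm⟩
      · exact Or.inl hd
    · right; exact ⟨w, List.mem_cons_of_mem _ hw, hwe⟩

lemma pv_idx_nonneg (res : List Int) (r i : Int)
    (h : PySem.Dict.get? ((PySem.List.enumerate res).foldl (fun d p => d.insert p.2 p.1) PySem.Dict.empty) r = some i) :
    0 ≤ i := by
  have hmem := PySem.Dict.mem_items_of_get?_eq_some _ h
  rcases pv_foldl_insert_val _ r i hmem with h' | ⟨q, hq, hq1⟩
  · simp [PySem.Dict.empty] at h'
  · rcases (PySem.List.mem_enumerate_iff res 0 q).mp hq with ⟨k, hk, rfl⟩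
    simp at hq1
    omega

lemma pv_outer (res : List Int) (pad : Int) (idx : PySem.Dict Int Int) (hpad : 0 < pad)
    (hidx : ∀ r i, PySem.Dict.get? idx r = some i → 0 ≤ i) :
    ∀ (l : List Int) (e : List Int) (nxt : PySem.Dict Int Int), pvInv res e nxt →
    (l.foldl (pvStepB res pad idx) (e, nxt)).1 = l.foldl (pvStepA res pad idx) e
      ∧ pvInv res (l.foldl (pvStepB res pad idx) (e, nxt)).1 (l.foldl (pvStepB res pad idx) (e, nxt)).2 := by
  intro l
  induction l with
  | nil => intro e nxt hinv; exact ⟨rfl, hinv⟩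
  | cons r t ih =>
    intro e nxt hinv
    simp only [List.foldl_cons]
    cases hg : PySem.Dict.get? idx r with
    | none =>
      have hA : pvStepA res pad idx e r = e := by simp [pvStepA, hg]
      have hB : pvStepB res pad idx (e, nxt) r = (e, nxt) := by simp [pvStepB, hg]
      rw [hA, hB]
      exact ih e nxt hinv
    | some i =>
      have hi0 : 0 ≤ i := hidx r i hg
      set lo := max 0 (i - pad) with hlo
      set hi := min (PySem.List.len res) (i + pad + 1) with hhi
      have hlen : PySem.List.len res = (res.length : Int) := by simp [PySem.List.len_eq]
      have hhi0 : 0 ≤ hi := by rw [hhi, hlen]; omega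
      have hhin : hi ≤ (res.length : Int) := by rw [hhi, hlen]; omega
      have hlo0 : 0 ≤ lo := by omega
      -- the initial skip
      have hmono : ∀ a b, PySem.Dict.get? nxt a = some b → a < b :=
        fun a b hab => (hinv.2 a b hab).1.1
      have hfull : ∀ a b, PySem.Dict.get? nxt a = some b → lo ≤ a → pvFull nxt a b :=
        fun a b hab _ => (hinv.2 a b hab).2
      have hskip := pv_skip_spec nxt hmono hinv.1 ((PySem.Dict.items nxt).length + 1) lo
        (Nat.lt_succ_of_le List.countP_le_length) hfull
      set j := pvSkip nxt lo ((PySem.Dict.items nxt).length + 1) with hj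
      obtain ⟨hjge, hjnc, hjcov⟩ := hskip
      have hinvW : pvInvW res e nxt j hi := by
        refine ⟨hinv.1, ?_⟩
        intro a b hab
        exact ⟨(hinv.2 a b hab).1, Or.inl (hinv.2 a b hab).2⟩
      have hwin := pv_window_eq res hi hhi0 hhin ((hi - j).toNat + 1) e nxt j
        (Nat.lt_succ_self _) (by omega) hjnc hinvW
      have hB : pvStepB res pad idx (e, nxt) r
          = pvWindow res hi ((hi - j).toNat + 1) e nxt j := by
        simp only [pvStepB, hg]
        rfl
      have hA : pvStepA res pad idx e r
          = (PySem.List.slice res (some lo) (some hi)).foldl PySem.Set.add e := by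
        simp only [pvStepA, hg]
        rfl
      have hAB : pvStepA res pad idx e r = (pvStepB res pad idx (e, nxt) r).1 := by
        rw [hA, hB, hwin.1]
        exact pv_fold_slice_drop res hi hhi0 hhin (j - lo).toNat lo j e hlo0 hjge le_rfl
          (fun m h1 h2 => by
            rcases Option.isSome_iff_exists.mp (hjcov m h1 h2) with ⟨bm, hbm⟩
            exact (hinv.2 m bm hbm).1.2.2.2)
      have hinv' : pvInv res (pvStepB res pad idx (e, nxt) r).1 (pvStepB res pad idx (e, nxt) r).2 := by
        rw [hB]; exact hwin.2.1
      rw [hAB]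
      have := ih (pvStepB res pad idx (e, nxt) r).1 (pvStepB res pad idx (e, nxt) r).2 hinv'
      simpa using this

-- ===== VERDICT (by name: the statement is the Claim_ definition above) =====
theorem seq_pad_set_py_spec : Claim_equal_seq_pad_set_py := by
  intro res base pad _
  unfold Spec_seq_pad_set_py seq_pad_set_py seq_pad_set_py_alt
  by_cases h : pad ≤ 0 ∨ base = []
  · simp [h]
  · simp only [h, if_false]
    have hpad : 0 < pad := by rcases not_or.mp h with ⟨h1, _⟩; omega
    have hinv : pvInv res (PySem.Set.ofList base) PySem.Dict.empty := by
      constructor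
      · simp [PySem.Dict.keys_empty]
      · intro a b hab; simp [PySem.Dict.get?_empty] at hab
    have := pv_outer res pad
      ((PySem.List.enumerate res).foldl (fun d p => d.insert p.2 p.1) PySem.Dict.empty) hpad
      (fun r i h => pv_idx_nonneg res r i h)
      (PySem.Set.ofList base) (PySem.Set.ofList base) PySem.Dict.empty hinv
    exact this.1.symm
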